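-- pv_equiv track=rewrite | github.com/labdao/plex | tools/sequence-sampler/utils.py | slash_to_convexity_notation
-- ===== SOURCE A (Python) =====
-- def slash_to_convexity_notation(sequence, slash_contig):
--     # Find the maximum index required
--     max_index = 0
--     parts = slash_contig.split('/')
--     for part in parts:
--         if ':' in part:
--             _, end = map(int, part[1:].split(':'))
--             max_index = max(max_index, end)
--         elif part:
--             max_index = max(max_index, int(part[1:]))
--
--     # Ensure permissibility_seed is long enough and initialize with ':'
--     permissibility_seed = ['-'] * max(max_index, len(sequence))
--
--     # Process each part of the slash_contig
--     for part in parts: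
--         if part:
--             type_char = part[0]
--             if ':' in part:
--                 start, end = map(int, part[1:].split(':'))
--             else:
--                 start = end = int(part[1:])
--
--             for i in range(start, end + 1):
--                 if type_char == 'B':
--                     permissibility_seed[i-1] = sequence[i-1] if i-1 < len(sequence) else '-'
--                 elif type_char == 'x':
--                     permissibility_seed[i-1] = 'X'
--                 elif type_char == '+':
--                     permissibility_seed[i-1] = '+'
--
--     # Join the list into a string and return
--     return ''.join(permissibility_seed)
-- ===== SOURCE B (Python) =====
-- def slash_to_convexity_notation(sequence, slash_contig):
--     # Gather instead of scatter: parse the parts once into records, then build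
--     # each output position directly by scanning the records in reverse for the
--     # last painting record that covers it (last-writer-wins without an array).
--     records = []
--     n = len(sequence)
--     for part in slash_contig.split('/'):
--         if not part:
--             continue
--         if ':' in part:
--             s, e = part[1:].split(':')
--             start, end = int(s), int(e)
--         else:
--             start = end = int(part[1:])
--         records.append((part[0], start, end))
--         if end > n:
--             n = end
--
--     def char_at(i):  # 1-based position
--         for type_char, start, end in reversed(records):
--             if start <= i <= end:
--                 if type_char == 'B':
--                     return sequence[i-1] if i-1 < len(sequence) else '-'
--                 if type_char == 'x':
--                     return 'X'
--                 if type_char == '+':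
--                     return '+'
--         return '-'
--
--     return ''.join(char_at(i) for i in range(1, n + 1))
-- ===== Notes on version B (the rewrite author's own statement) =====
-- stated objective: alternative
-- what changed: A scatters: it allocates a '-' array and paints every range over it in order (last write wins); B gathers: it parses the parts once into records and then constructs each output position directly, scanning the records in reverse for the last painting record covering that position, with no mutable array at all.
-- outside the precondition, e.g. on slash_to_convexity_notation('ABCD', 'x0:2'): A returns 'XX-X', B returns 'XX--'
import Mathlib
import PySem

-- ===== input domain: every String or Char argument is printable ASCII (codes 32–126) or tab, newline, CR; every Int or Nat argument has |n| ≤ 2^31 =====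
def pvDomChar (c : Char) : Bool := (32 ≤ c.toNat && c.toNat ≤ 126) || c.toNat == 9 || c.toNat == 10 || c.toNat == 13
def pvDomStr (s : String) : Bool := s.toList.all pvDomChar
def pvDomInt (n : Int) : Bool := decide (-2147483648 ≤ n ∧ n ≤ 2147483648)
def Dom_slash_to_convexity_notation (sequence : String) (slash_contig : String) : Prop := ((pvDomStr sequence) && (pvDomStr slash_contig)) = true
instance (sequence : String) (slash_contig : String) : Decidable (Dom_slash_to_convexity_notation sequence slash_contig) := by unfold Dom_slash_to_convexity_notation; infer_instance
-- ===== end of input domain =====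

-- A scatters (paints ranges over a mutable '-' array, last write wins); B gathers
-- (parses once into records, then builds each output position by scanning the
-- records in reverse for the last painting record covering it; no array).
-- Objective: alternative algorithm, similar cost.

-- ===== PORT A =====
-- body of A's first for-loop (running maximum of the parsed end indices)
def pvA_maxStep (max_index : Int) (part : List Char) : Int :=
  if ':' ∈ part then
    match (PySem.Chars.split? (part.drop 1) [':']).getD [] with
    | [a, b] =>
      match PySem.Int.ofChars? a, PySem.Int.ofChars? b with
      | some _, some e => max max_index e
      | _, _ => max_index          -- int() raises ValueError here: outside Pre_
    | _ => max_index               -- unpacking raises ValueError here: outside Pre_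
  else
    match part with                -- 'elif part:' — part non-empty
    | [] => max_index
    | _ :: rest =>                 -- rest = part[1:]
      match PySem.Int.ofChars? rest with
      | some v => max max_index v
      | none => max_index          -- int() raises ValueError here: outside Pre_

-- body of A's second for-loop (re-parse the part, then paint positions start..end)
def pvA_paintPart (seq : List Char) (seed : List Char) (part : List Char) : List Char :=
  match part with                  -- 'if part:' — part non-empty
  | [] => seed
  | type_char :: rest =>           -- type_char = part[0], rest = part[1:]
    let se : Int × Int :=
      if ':' ∈ type_char :: rest then
        match (PySem.Chars.split? rest [':']).getD [] with
        | [a, b] =>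
          match PySem.Int.ofChars? a, PySem.Int.ofChars? b with
          | some s, some e => (s, e)
          | _, _ => (1, 0)         -- ValueError: outside Pre_
        | _ => (1, 0)              -- ValueError: outside Pre_
      else
        match PySem.Int.ofChars? rest with
        | some v => (v, v)
        | none => (1, 0)           -- ValueError: outside Pre_
    (PySem.List.pyRange se.1 (se.2 + 1) 1).foldl (fun seed i =>
      if type_char = 'B' then
        PySem.List.pySetD seed (i - 1) (if i - 1 < (seq.length : Int) then PySem.List.pyGetD seq (i - 1) '-' else '-')
      else if type_char = 'x' then PySem.List.pySetD seed (i - 1) 'X'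
      else if type_char = '+' then PySem.List.pySetD seed (i - 1) '+'
      else seed) seed

def slash_to_convexity_notation (sequence : String) (slash_contig : String) : String :=
  let seq : List Char := sequence.toList
  let parts : List (List Char) := (PySem.Chars.split? slash_contig.toList ['/']).getD []
  let max_index : Int := parts.foldl pvA_maxStep 0
  let permissibility_seed : List Char := List.replicate (max max_index (seq.length : Int)).toNat '-'
  String.ofList (parts.foldl (pvA_paintPart seq) permissibility_seed)

-- ===== PORT B =====
-- parse one slash-part into a record (type_char, start, end); none = empty part skipped
-- (parse failures only occur outside Pre_, where B's Python raises like A's)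
def pvParsePart (part : List Char) : Option (Char × Int × Int) :=
  match part with
  | [] => none
  | c :: rest =>
    if ':' ∈ c :: rest then
      match (PySem.Chars.split? rest [':']).getD [] with
      | [a, b] =>
        match PySem.Int.ofChars? a, PySem.Int.ofChars? b with
        | some s, some e => some (c, s, e)
        | _, _ => none
      | _ => none
    else (PySem.Int.ofChars? rest).map (fun v => (c, v, v))

-- B's parse loop body: extend the record table and update the running maximum n
def pvB_collect (rm : List (Char × Int × Int) × Int) (part : List Char) : List (Char × Int × Int) × Int :=
  match pvParsePart part with
  | some r => (rm.1 ++ [r], if r.2.2 > rm.2 then r.2.2 else rm.2)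
  | none => rm

-- B's char_at: scan the reversed record list for the first painting record
-- covering position i (i is 1-based); '-' if none covers it
def pvPick (seq : List Char) (rs : List (Char × Int × Int)) (i : Int) : Char :=
  match rs with
  | [] => '-'
  | r :: rest =>
    if r.2.1 ≤ i ∧ i ≤ r.2.2 then
      if r.1 = 'B' then (if i - 1 < (seq.length : Int) then PySem.List.pyGetD seq (i - 1) '-' else '-')
      else if r.1 = 'x' then 'X'
      else if r.1 = '+' then '+'
      else pvPick seq rest i
    else pvPick seq rest i

def slash_to_convexity_notation_alt (sequence : String) (slash_contig : String) : String :=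
  let seq : List Char := sequence.toList
  let parts : List (List Char) := (PySem.Chars.split? slash_contig.toList ['/']).getD []
  let rn : List (Char × Int × Int) × Int := parts.foldl pvB_collect ([], (seq.length : Int))
  String.ofList ((PySem.List.pyRange 1 (rn.2 + 1) 1).map (pvPick seq rn.1.reverse))

-- ===== PRECONDITION & SPEC =====
-- Pre_ excludes inputs where A raises (a non-empty part whose tail is not int()-parsable,
-- or a ':'-part not splitting into exactly two int()-parsable pieces: ValueError) and,
-- for painting parts ('B'/'x'/'+'), a start below 1, where A either raises IndexError or
-- silently wraps the write to the end of the array (negative-index artefact).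
def pvPartOK (part : List Char) : Bool :=
  match part with
  | [] => true
  | c :: rest =>
    let start? : Option Int :=
      if ':' ∈ c :: rest then
        match (PySem.Chars.split? rest [':']).getD [] with
        | [a, b] =>
          match PySem.Int.ofChars? a, PySem.Int.ofChars? b with
          | some s, some _ => some s
          | _, _ => none
        | _ => none
      else PySem.Int.ofChars? rest
    match start? with
    | none => false
    | some s => if c = 'B' ∨ c = 'x' ∨ c = '+' then decide (1 ≤ s) else true

def Pre_slash_to_convexity_notation (sequence : String) (slash_contig : String) : Prop :=
  ∀ part ∈ (PySem.Chars.split? slash_contig.toList ['/']).getD [], pvPartOK part = true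
instance (sequence : String) (slash_contig : String) : Decidable (Pre_slash_to_convexity_notation sequence slash_contig) := by unfold Pre_slash_to_convexity_notation; infer_instance

def pvWitness_slash_to_convexity_notation : String × String := ("ACDEF", "B1:2/x3/+4:6/Z9")

def Spec_slash_to_convexity_notation (sequence : String) (slash_contig : String) (out : String) : Prop := out = slash_to_convexity_notation_alt sequence slash_contig
instance (sequence : String) (slash_contig : String) (out : String) : Decidable (Spec_slash_to_convexity_notation sequence slash_contig out) := by unfold Spec_slash_to_convexity_notation; infer_instance

-- ===== CLAIM (what is proved, stated in full; the proofs are below) =====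
def Claim_equal_slash_to_convexity_notation : Prop := ∀ (sequence : String) (slash_contig : String), Dom_slash_to_convexity_notation sequence slash_contig → Pre_slash_to_convexity_notation sequence slash_contig → Spec_slash_to_convexity_notation sequence slash_contig (slash_to_convexity_notation sequence slash_contig)

-- ===== LEMMAS AND PROOFS =====

-- abstraction of A's paint step acting on a parsed record (proof-side only)
def pvPaint (seq : List Char) (seed : List Char) (r : Char × Int × Int) : List Char :=
  (PySem.List.pyRange r.2.1 (r.2.2 + 1) 1).foldl (fun sd i =>
    if r.1 = 'B' then
      PySem.List.pySetD sd (i - 1) (if i - 1 < (seq.length : Int) then PySem.List.pyGetD seq (i - 1) '-' else '-')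
    else if r.1 = 'x' then PySem.List.pySetD sd (i - 1) 'X'
    else if r.1 = '+' then PySem.List.pySetD sd (i - 1) '+'
    else sd) seed

-- Option-valued pick: some c iff some painting record covers i
def pvPick? (seq : List Char) (rs : List (Char × Int × Int)) (i : Int) : Option Char :=
  match rs with
  | [] => none
  | r :: rest =>
    if r.2.1 ≤ i ∧ i ≤ r.2.2 then
      if r.1 = 'B' then some (if i - 1 < (seq.length : Int) then PySem.List.pyGetD seq (i - 1) '-' else '-')
      else if r.1 = 'x' then some 'X'
      else if r.1 = '+' then some '+'
      else pvPick? seq rest i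
    else pvPick? seq rest i

theorem pv_pick_eq (seq : List Char) (rs : List (Char × Int × Int)) (i : Int) :
    pvPick seq rs i = (pvPick? seq rs i).getD '-' := by
  induction rs with
  | nil => rfl
  | cons r rest ih =>
    simp only [pvPick, pvPick?]
    split_ifs <;> simp [ih]

theorem pv_pick?_append (seq : List Char) (l1 l2 : List (Char × Int × Int)) (i : Int) :
    pvPick? seq (l1 ++ l2) i = (pvPick? seq l1 i).or (pvPick? seq l2 i) := by
  induction l1 with
  | nil => simp [pvPick?]
  | cons r rest ih =>
    simp only [List.cons_append, pvPick?]
    split_ifs <;> simp [ih]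

theorem pv_max_eq_if (mi e : Int) : max mi e = if e > mi then e else mi := by
  split_ifs with h <;> omega

-- an OK non-empty part parses; A's two loop bodies act on it exactly as a max-update
-- and a paint of the parsed record, and a painting record starts at 1 or later
theorem pv_ok_spec (c : Char) (rest : List Char) (h : pvPartOK (c :: rest) = true) :
    ∃ s e, pvParsePart (c :: rest) = some (c, s, e) ∧
      (∀ mi : Int, pvA_maxStep mi (c :: rest) = max mi e) ∧
      (∀ seq seed : List Char, pvA_paintPart seq seed (c :: rest) = pvPaint seq seed (c, s, e)) ∧
      ((c = 'B' ∨ c = 'x' ∨ c = '+') → 1 ≤ s) := by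
  by_cases hc : ':' ∈ c :: rest
  · simp only [pvPartOK, if_pos hc] at h
    rcases hsp : (PySem.Chars.split? rest [':']).getD [] with _ | ⟨a, tl⟩
    · simp [hsp] at h
    rcases tl with _ | ⟨b, tl2⟩
    · simp [hsp] at h
    rcases tl2 with _ | ⟨z, tl3⟩
    swap
    · simp [hsp] at h
    rcases hA : PySem.Int.ofChars? a with _ | s
    · simp [hsp, hA] at h
    rcases hB : PySem.Int.ofChars? b with _ | e
    · simp [hsp, hA, hB] at h
    refine ⟨s, e, ?_, ?_, ?_, ?_⟩
    · simp [pvParsePart, hc, hsp, hA, hB]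
    · intro mi
      simp [pvA_maxStep, hc, hsp, hA, hB]
    · intro seq seed
      simp only [pvA_paintPart, if_pos hc, hsp, hA, hB, pvPaint]
    · intro hpaint
      simp only [hsp, hA, hB, if_pos hpaint] at h
      exact of_decide_eq_true h
  · simp only [pvPartOK, if_neg hc] at h
    rcases hV : PySem.Int.ofChars? rest with _ | v
    · simp [hV] at h
    refine ⟨v, v, ?_, ?_, ?_, ?_⟩
    · simp [pvParsePart, hc, hV]
    · intro mi
      simp [pvA_maxStep, hc, hV]
    · intro seq seed
      simp only [pvA_paintPart, if_neg hc, hV, pvPaint]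
    · intro hpaint
      simp only [hV, if_pos hpaint] at h
      exact of_decide_eq_true h

-- B's single parse loop = the record table (filterMap) paired with A's max fold
theorem pv_fold_collect (parts : List (List Char)) (h : ∀ p ∈ parts, pvPartOK p = true)
    (rs : List (Char × Int × Int)) (mi : Int) :
    parts.foldl pvB_collect (rs, mi) = (rs ++ parts.filterMap pvParsePart, parts.foldl pvA_maxStep mi) := by
  induction parts generalizing rs mi with
  | nil => simp
  | cons p ps ih =>
    have hp : pvPartOK p = true := h p List.mem_cons_self
    have hps : ∀ q ∈ ps, pvPartOK q = true := fun q hq => h q (List.mem_cons_of_mem _ hq)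
    rw [List.foldl_cons, List.foldl_cons]
    cases p with
    | nil =>
      have hnone : pvParsePart ([] : List Char) = none := rfl
      have hmax : pvA_maxStep mi ([] : List Char) = mi := rfl
      rw [hmax, List.filterMap_cons_none hnone]
      simpa [pvB_collect, hnone] using ih hps rs mi
    | cons c rest =>
      obtain ⟨s, e, hparse, hmax, -, -⟩ := pv_ok_spec c rest hp
      rw [hmax mi, List.filterMap_cons_some hparse]
      simp [pvB_collect, hparse, ← pv_max_eq_if]
      rw [ih hps]
      simp

-- A's reparse-and-paint loop = the paint fold over the record table
theorem pv_fold_paint (parts : List (List Char)) (h : ∀ p ∈ parts, pvPartOK p = true)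
    (seq seed : List Char) :
    parts.foldl (pvA_paintPart seq) seed = (parts.filterMap pvParsePart).foldl (pvPaint seq) seed := by
  induction parts generalizing seed with
  | nil => simp
  | cons p ps ih =>
    have hp : pvPartOK p = true := h p List.mem_cons_self
    have hps : ∀ q ∈ ps, pvPartOK q = true := fun q hq => h q (List.mem_cons_of_mem _ hq)
    rw [List.foldl_cons]
    cases p with
    | nil =>
      have hnone : pvParsePart ([] : List Char) = none := rfl
      rw [List.filterMap_cons_none hnone]
      exact ih hps seed
    | cons c rest =>
      obtain ⟨s, e, hparse, -, hpaint, -⟩ := pv_ok_spec c rest hp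
      rw [List.filterMap_cons_some hparse, List.foldl_cons, hpaint seq seed]
      exact ih hps _

-- the range fill preserves length
theorem pv_fill_length (f : Int → Char) (l : List Int) (seed : List Char) :
    (l.foldl (fun sd i => PySem.List.pySetD sd (i - 1) (f i)) seed).length = seed.length := by
  induction l generalizing seed with
  | nil => rfl
  | cons i l ih => rw [List.foldl_cons, ih, PySem.List.length_pySetD]

theorem pv_paint_length (seq seed : List Char) (r : Char × Int × Int) :
    (pvPaint seq seed r).length = seed.length := by
  unfold pvPaint
  split_ifs with h1 h2 h3
  · exact pv_fill_length _ _ seed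
  · exact pv_fill_length _ _ seed
  · exact pv_fill_length _ _ seed
  · rw [PySem.List.foldl_ignore]

-- effect of filling positions start..end with f on cell j (0-based);
-- g is the loop body (hg identifies it with the pySetD write of f)
theorem pv_fill_get (e : Int) (f : Int → Char) (g : List Char → Int → List Char)
    (hg : ∀ sd i, g sd i = PySem.List.pySetD sd (i - 1) (f i)) (n : Nat) :
    ∀ (s : Int), (e + 1 - s).toNat ≤ n →
    ∀ (seed : List Char), 1 ≤ s → e ≤ (seed.length : Int) → ∀ (j : Nat),
    ((PySem.List.pyRange s (e + 1) 1).foldl g seed)[j]? =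
      if s ≤ (j : Int) + 1 ∧ (j : Int) + 1 ≤ e then some (f ((j : Int) + 1)) else seed[j]? := by
  induction n with
  | zero =>
    intro s hn seed hs he j
    rw [PySem.List.pyRange_one_eq_nil (by omega), if_neg (by omega)]
    rfl
  | succ n ih =>
    intro s hn seed hs he j
    by_cases hse : e + 1 ≤ s
    · rw [PySem.List.pyRange_one_eq_nil hse, if_neg (by omega)]
      rfl
    · rw [PySem.List.pyRange_one_cons (by omega), List.foldl_cons, hg]
      have hcast : s - 1 = (((s - 1).toNat : Nat) : Int) := by omega
      have hset : PySem.List.pySetD seed (s - 1) (f s) = seed.set (s - 1).toNat (f s) := by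
        rw [hcast, PySem.List.pySetD_natCast]
        simp
      have hlen : (PySem.List.pySetD seed (s - 1) (f s)).length = seed.length := by
        rw [hset, List.length_set]
      have he' : e ≤ ((PySem.List.pySetD seed (s - 1) (f s)).length : Int) := by
        rw [hlen]; exact he
      have hb1 : (e + 1 - (s + 1)).toNat ≤ n := by omega
      have hb2 : (1 : Int) ≤ s + 1 := by omega
      rw [ih (s + 1) hb1 (PySem.List.pySetD seed (s - 1) (f s)) hb2 he' j]
      by_cases h1 : s + 1 ≤ (j : Int) + 1 ∧ (j : Int) + 1 ≤ e
      · rw [if_pos h1, if_pos (by omega)]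
      · rw [if_neg h1, hset, List.getElem?_set]
        by_cases h2 : (j : Int) + 1 = s
        · have hidx : (s - 1).toNat = j := by omega
          have hjlt : j < seed.length := by omega
          rw [if_pos hidx, if_pos (hidx ▸ hjlt), if_pos (by omega), ← h2]
        · rw [if_neg (by omega), if_neg (by omega)]

-- effect of painting one record on cell j
theorem pv_paint_get (seq seed : List Char) (r : Char × Int × Int)
    (hr : (r.1 = 'B' ∨ r.1 = 'x' ∨ r.1 = '+') → 1 ≤ r.2.1 ∧ r.2.2 ≤ (seed.length : Int)) (j : Nat) :
    (pvPaint seq seed r)[j]? = (pvPick? seq [r] ((j : Int) + 1)).or seed[j]? := by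
  obtain ⟨c, s, e⟩ := r
  by_cases hB : c = 'B'
  · obtain ⟨h1, h2⟩ := hr (Or.inl hB)
    subst hB
    unfold pvPaint
    rw [pv_fill_get e (fun i => if i - 1 < (seq.length : Int) then PySem.List.pyGetD seq (i - 1) '-' else '-')
        _ (fun sd i => by simp) (e + 1 - s).toNat s le_rfl seed h1 h2 j]
    simp only [pvPick?]
    split_ifs with h <;> simp
  · by_cases hx : c = 'x'
    · obtain ⟨h1, h2⟩ := hr (Or.inr (Or.inl hx))
      subst hx
      unfold pvPaint
      rw [pv_fill_get e (fun _ => 'X') _ (fun sd i => by simp [hB]) (e + 1 - s).toNat s le_rfl seed h1 h2 j]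
      simp only [pvPick?]
      split_ifs with h <;> simp [hB]
    · by_cases hp : c = '+'
      · obtain ⟨h1, h2⟩ := hr (Or.inr (Or.inr hp))
        subst hp
        unfold pvPaint
        rw [pv_fill_get e (fun _ => '+') _ (fun sd i => by simp [hB, hx]) (e + 1 - s).toNat s le_rfl seed h1 h2 j]
        simp only [pvPick?]
        split_ifs with h <;> simp [hB, hx]
      · simp only [pvPaint, pvPick?, hB, hx, hp, if_false]
        rw [PySem.List.foldl_ignore]
        split_ifs <;> simp [pvPick?]

-- painting a record list = picking from its reverse, falling back to the seed
theorem pv_foldl_paint_get (seq : List Char) (recs : List (Char × Int × Int)) :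
    ∀ (seed : List Char),
    (∀ r ∈ recs, (r.1 = 'B' ∨ r.1 = 'x' ∨ r.1 = '+') → 1 ≤ r.2.1 ∧ r.2.2 ≤ (seed.length : Int)) →
    ∀ (j : Nat),
    (recs.foldl (pvPaint seq) seed)[j]? = (pvPick? seq recs.reverse ((j : Int) + 1)).or seed[j]? := by
  induction recs with
  | nil => intro seed _ j; simp [pvPick?]
  | cons r rs ih =>
    intro seed hr j
    have hlen : (pvPaint seq seed r).length = seed.length := pv_paint_length seq seed r
    rw [List.foldl_cons]
    rw [ih (pvPaint seq seed r)
        (fun q hq hpq => by rw [hlen]; exact hr q (List.mem_cons_of_mem _ hq) hpq) j]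
    rw [pv_paint_get seq seed r (hr r List.mem_cons_self) j]
    rw [List.reverse_cons, pv_pick?_append, Option.or_assoc]

theorem pv_foldl_paint_length (seq : List Char) (recs : List (Char × Int × Int)) :
    ∀ (seed : List Char), (recs.foldl (pvPaint seq) seed).length = seed.length := by
  induction recs with
  | nil => intro seed; rfl
  | cons r rs ih => intro seed; rw [List.foldl_cons, ih, pv_paint_length]

-- the max fold is monotone in its accumulator
theorem pv_maxStep_le (mi : Int) (p : List Char) : mi ≤ pvA_maxStep mi p := by
  unfold pvA_maxStep
  split_ifs
  · split
    · split <;> omega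
    · omega
  · split
    · omega
    · split <;> omega

theorem pv_foldl_maxStep_le (parts : List (List Char)) : ∀ (mi : Int),
    mi ≤ parts.foldl pvA_maxStep mi := by
  induction parts with
  | nil => intro mi; exact le_rfl
  | cons p ps ih =>
    intro mi
    rw [List.foldl_cons]
    exact le_trans (pv_maxStep_le mi p) (ih _)

-- every parsed end index is bounded by the max fold
theorem pv_ends_le (parts : List (List Char)) (h : ∀ p ∈ parts, pvPartOK p = true) :
    ∀ (mi : Int), ∀ r ∈ parts.filterMap pvParsePart, r.2.2 ≤ parts.foldl pvA_maxStep mi := by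
  induction parts with
  | nil => intro mi r hrm; simp at hrm
  | cons p ps ih =>
    intro mi r hrm
    have hps : ∀ q ∈ ps, pvPartOK q = true := fun q hq => h q (List.mem_cons_of_mem _ hq)
    rw [List.foldl_cons]
    cases p with
    | nil =>
      have hnone : pvParsePart ([] : List Char) = none := rfl
      rw [List.filterMap_cons_none hnone] at hrm
      exact ih hps _ r hrm
    | cons c rest =>
      obtain ⟨s, e, hparse, hmax, -, -⟩ := pv_ok_spec c rest (h _ List.mem_cons_self)
      rw [List.filterMap_cons_some hparse] at hrm
      rcases List.mem_cons.mp hrm with h1 | h1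
      · subst h1
        calc (e : Int) ≤ pvA_maxStep mi (c :: rest) := by rw [hmax mi]; omega
          _ ≤ _ := pv_foldl_maxStep_le ps _
      · exact ih hps _ r h1

-- the max fold commutes with taking a max on the accumulator
theorem pv_foldl_maxStep_shift (parts : List (List Char)) (h : ∀ p ∈ parts, pvPartOK p = true) :
    ∀ (a b : Int), parts.foldl pvA_maxStep (max a b) = max a (parts.foldl pvA_maxStep b) := by
  induction parts with
  | nil => intro a b; rfl
  | cons p ps ih =>
    intro a b
    have hps : ∀ q ∈ ps, pvPartOK q = true := fun q hq => h q (List.mem_cons_of_mem _ hq)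
    rw [List.foldl_cons, List.foldl_cons]
    cases p with
    | nil =>
      have h1 : pvA_maxStep (max a b) ([] : List Char) = max a b := rfl
      have h2 : pvA_maxStep b ([] : List Char) = b := rfl
      rw [h1, h2, ih hps]
    | cons c rest =>
      obtain ⟨s, e, -, hmax, -, -⟩ := pv_ok_spec c rest (h _ List.mem_cons_self)
      rw [hmax, hmax, max_assoc, ih hps]

-- painting records of OK parts start at 1 or later
theorem pv_starts_ok (parts : List (List Char)) (h : ∀ p ∈ parts, pvPartOK p = true) :
    ∀ r ∈ parts.filterMap pvParsePart, (r.1 = 'B' ∨ r.1 = 'x' ∨ r.1 = '+') → 1 ≤ r.2.1 := by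
  intro r hrm hpr
  obtain ⟨p, hp, hparse⟩ := List.mem_filterMap.mp hrm
  cases p with
  | nil => exact absurd hparse (by simp [pvParsePart])
  | cons c rest =>
    obtain ⟨s, e, hparse', -, -, hstart⟩ := pv_ok_spec c rest (h _ hp)
    rw [hparse'] at hparse
    have hre : (c, s, e) = r := Option.some.inj hparse
    subst hre
    exact hstart hpr

-- ===== VERDICT (by name: the statement is the Claim_ definition above) =====
theorem slash_to_convexity_notation_spec : Claim_equal_slash_to_convexity_notation := by
  intro sequence slash_contig _ hpre
  unfold Spec_slash_to_convexity_notation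
  unfold Pre_slash_to_convexity_notation at hpre
  unfold slash_to_convexity_notation slash_to_convexity_notation_alt
  simp only []
  set seq : List Char := sequence.toList with hseq
  set parts : List (List Char) := (PySem.Chars.split? slash_contig.toList ['/']).getD [] with hparts
  set recs : List (Char × Int × Int) := parts.filterMap pvParsePart with hrecs
  set N : Int := parts.foldl pvA_maxStep (seq.length : Int) with hN
  have hlen0 : (0 : Int) ≤ (seq.length : Int) := Int.natCast_nonneg _
  have hNge : (seq.length : Int) ≤ N := pv_foldl_maxStep_le parts _
  have hNnn : (0 : Int) ≤ N := le_trans hlen0 hNge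
  -- A's array length equals B's n
  have hmaxN : max (parts.foldl pvA_maxStep 0) (seq.length : Int) = N := by
    have h := pv_foldl_maxStep_shift parts hpre (seq.length : Int) 0
    rw [max_eq_left hlen0] at h
    rw [hN, h]
    exact max_comm _ _
  -- B's fold
  rw [pv_fold_collect parts hpre [] (seq.length : Int)]
  simp only [List.nil_append]
  rw [pv_fold_paint parts hpre seq _, hmaxN, ← hrecs, ← hN]
  -- the record constraints
  set seed : List Char := List.replicate N.toNat '-' with hseed
  have hseedlen : (seed.length : Int) = N := by
    rw [hseed, List.length_replicate]; omega
  have hr : ∀ r ∈ recs, (r.1 = 'B' ∨ r.1 = 'x' ∨ r.1 = '+') → 1 ≤ r.2.1 ∧ r.2.2 ≤ (seed.length : Int) := by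
    intro r hrm hpr
    refine ⟨pv_starts_ok parts hpre r hrm hpr, ?_⟩
    rw [hseedlen]
    exact pv_ends_le parts hpre _ r hrm
  -- compare element by element
  congr 1
  apply List.ext_getElem?
  intro j
  rw [PySem.List.pyRange_one]
  have hNN : (N + 1 - 1).toNat = N.toNat := by omega
  rw [hNN, List.map_map]
  by_cases hj : j < N.toNat
  · rw [pv_foldl_paint_get seq recs seed hr j]
    have hrep : seed[j]? = some '-' := by
      rw [hseed]; simp [hj]
    rw [hrep, List.getElem?_map, List.getElem?_range hj]
    simp only [Option.map_some, Function.comp_apply]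
    have h1j : (1 : Int) + (j : Int) = (j : Int) + 1 := by omega
    rw [h1j, pv_pick_eq]
    cases pvPick? seq recs.reverse ((j : Int) + 1) <;> simp
  · have h1 : ((recs.foldl (pvPaint seq) seed).length : Int) = N := by
      rw [pv_foldl_paint_length, hseedlen]
    have h2 : (recs.foldl (pvPaint seq) seed)[j]? = none := by
      apply List.getElem?_eq_none_iff.mpr; omega
    rw [h2]
    have h4 : (List.map (pvPick seq recs.reverse ∘ fun k : Nat => 1 + (k : Int)) (List.range N.toNat))[j]? = none := by
      apply List.getElem?_eq_none_iff.mpr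
      simp only [List.length_map, List.length_range]
      omega
    exact h4.symm
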